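-- pv_equiv track=rewrite | github.com/tajpatel58/Machine-Learning- | Interview Questions.py | secondHighestDigit
-- ===== SOURCE A (Python) =====
-- def secondHighestDigit(input):
--     # create a list of the characters in the string.
--     list_str = list(input)
--     # A list to store the digits in our string.
--     list_of_digits = []
--     for character in input:
--         # Try cast the character in our string to an integer. (checks if digit or not)
--         try:
--             digit = int(character)
--             list_of_digits.append(digit)
--         # if not a digit, i.e is a string, then move to next character in string.
--         except:
--             continue
--     # Provided we have atleast 2 digits we can pick the second biggest number.
--     if len(list_of_digits) >= 2:
--         list_of_digits.sort(reverse=True)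
--         return list_of_digits[1]
--     # Exceptions for no digits or one digit.
--     else:
--         return -1
-- ===== SOURCE B (Python) =====
-- def secondHighestDigit(input):
--     # One pass: track the two largest digit values seen (duplicates allowed).
--     m1 = m2 = -1
--     count = 0
--     for ch in input:
--         if '0' <= ch <= '9':
--             d = ord(ch) - 48
--             count += 1
--             if d >= m1:
--                 m1, m2 = d, m1
--             elif d > m2:
--                 m2 = d
--     return m2 if count >= 2 else -1
-- ===== Notes on version B (the rewrite author's own statement) =====
-- stated objective: faster
-- what changed: Replaces collect-all-digits-then-sort-descending-and-index with a single pass that maintains the two largest digit values (duplicates allowed) and a digit count.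
import Mathlib
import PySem

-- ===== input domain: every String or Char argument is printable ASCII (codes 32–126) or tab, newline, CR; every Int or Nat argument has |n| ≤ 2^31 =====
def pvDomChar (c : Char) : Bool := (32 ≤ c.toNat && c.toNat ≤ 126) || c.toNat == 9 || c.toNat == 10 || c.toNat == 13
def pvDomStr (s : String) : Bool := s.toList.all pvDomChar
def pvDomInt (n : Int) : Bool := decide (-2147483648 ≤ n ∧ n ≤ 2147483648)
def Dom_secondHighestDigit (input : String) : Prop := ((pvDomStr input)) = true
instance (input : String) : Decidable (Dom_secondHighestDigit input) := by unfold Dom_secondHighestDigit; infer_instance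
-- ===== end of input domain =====

-- B replaces A's collect-then-sort-descending-and-index with a single pass keeping the two
-- largest digit values (duplicates allowed) and a digit count: O(n) instead of O(n log n).

-- ===== PORT A =====
-- int(character) succeeds on exactly the chars '0'..'9' within the ASCII domain (try/except skips the rest).
def secondHighestDigit (input : String) : Int :=
  let list_of_digits : List Int :=
    input.toList.foldl (fun acc c => if c.isDigit then acc ++ [((c.toNat : Int) - 48)] else acc) []
  if 2 ≤ list_of_digits.length then
    -- sort(reverse=True) then [1]; the index is in range (length ≥ 2), so getD's default is never used
    (PySem.List.pyGet? (PySem.List.sorted list_of_digits (fun x => x) true) 1).getD 0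
  else -1

-- ===== PORT B =====
-- state (m1, m2, count): two largest digit values so far (with multiplicity) and the digit count
def shdStep (st : Int × Int × Int) (d : Int) : Int × Int × Int :=
  if d ≥ st.1 then (d, st.1, st.2.2 + 1)
  else if d > st.2.1 then (st.1, d, st.2.2 + 1)
  else (st.1, st.2.1, st.2.2 + 1)

def secondHighestDigit_alt (input : String) : Int :=
  let st :=
    input.toList.foldl
      (fun st c => if c.isDigit then shdStep st ((c.toNat : Int) - 48) else st)
      (-1, -1, 0)
  if 2 ≤ st.2.2 then st.2.1 else -1

-- ===== PRECONDITION & SPEC =====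
def Spec_secondHighestDigit (input : String) (out : Int) : Prop := out = secondHighestDigit_alt input
instance (input : String) (out : Int) : Decidable (Spec_secondHighestDigit input out) := by unfold Spec_secondHighestDigit; infer_instance

-- ===== CLAIM (what is proved, stated in full; the proofs are below) =====
def Claim_equal_secondHighestDigit : Prop := ∀ (input : String), Dom_secondHighestDigit input → Spec_secondHighestDigit input (secondHighestDigit input)

-- ===== LEMMAS AND PROOFS =====

-- the digit list A builds
def shdDigits (input : String) : List Int :=
  (input.toList.filter Char.isDigit).map (fun c => ((c.toNat : Int) - 48))

theorem shdStep_comm (st : Int × Int × Int) (a b : Int) :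
    shdStep (shdStep st a) b = shdStep (shdStep st b) a := by
  obtain ⟨m1, m2, n⟩ := st
  simp only [shdStep]
  split_ifs <;> simp_all [Prod.ext_iff] <;> omega

theorem shd_foldl_perm {l₁ l₂ : List Int} (p : l₁.Perm l₂) (st : Int × Int × Int) :
    l₁.foldl shdStep st = l₂.foldl shdStep st := by
  induction p generalizing st with
  | nil => rfl
  | cons x _ ih => simp [List.foldl, ih]
  | swap x y l => simp [List.foldl, shdStep_comm]
  | trans _ _ ih₁ ih₂ => exact (ih₁ st).trans (ih₂ st)

theorem shd_foldl_count (l : List Int) (st : Int × Int × Int) :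
    (l.foldl shdStep st).2.2 = st.2.2 + l.length := by
  induction l generalizing st with
  | nil => simp
  | cons x t ih =>
    simp only [List.foldl, ih, shdStep]
    split_ifs <;> simp <;> omega

theorem shd_foldl_stable (t : List Int) (a b : Int) (n : Int)
    (hb : b ≤ a) (ht : ∀ d ∈ t, d ≤ b) :
    t.foldl shdStep (a, b, n) = (a, b, n + t.length) := by
  induction t generalizing n with
  | nil => simp
  | cons x t ih =>
    have hx : x ≤ b := ht x (by simp)
    have hrec := ih (n + 1) (fun d hd => ht d (by simp [hd]))
    simp only [List.foldl, shdStep]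
    split_ifs with h1 h2
    · have hxa : x = a := le_antisymm (le_trans hx hb) h1
      have hab : a = b := le_antisymm (by omega) hb
      rw [show ((x, a, n + 1) : Int × Int × Int) = (a, b, n + 1) by simp [hxa, hab]]
      rw [hrec]; simp; omega
    · omega
    · rw [hrec]; simp; omega

theorem shd_foldl_sorted (a b : Int) (t : List Int)
    (h : (a :: b :: t).Pairwise (fun x y => y ≤ x))
    (ha : 0 ≤ a) (hb : 0 ≤ b) :
    (a :: b :: t).foldl shdStep (-1, -1, 0) = (a, b, (2 : Int) + t.length) := by
  have hba : b ≤ a := (List.pairwise_cons.mp h).1 b (by simp)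
  have ht : ∀ d ∈ t, d ≤ b :=
    (List.pairwise_cons.mp (List.pairwise_cons.mp h).2).1
  have h1 : shdStep ((-1 : Int), (-1 : Int), (0 : Int)) a = (a, -1, 1) := by
    simp [shdStep]; omega
  have h2 : shdStep ((a : Int), (-1 : Int), (1 : Int)) b = (a, b, 2) := by
    simp only [shdStep]
    split_ifs with g1 g2
    · have : b = a := le_antisymm hba g1
      simp [this]
    · rfl
    · omega
  simp only [List.foldl, h1, h2]
  exact shd_foldl_stable t a b 2 hba ht

theorem shd_digits_nonneg (input : String) : ∀ d ∈ shdDigits input, 0 ≤ d := by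
  intro d hd
  simp only [shdDigits, List.mem_map, List.mem_filter] at hd
  obtain ⟨c, ⟨_, hc⟩, rfl⟩ := hd
  rw [Char.isDigit, Bool.and_eq_true, decide_eq_true_iff, decide_eq_true_iff] at hc
  obtain ⟨h1, _⟩ := hc
  simp only [ge_iff_le, UInt32.le_iff_toNat_le] at h1
  have e0 : ('0').val.toNat = 48 := rfl
  have ec : c.toNat = c.val.toNat := rfl
  omega

theorem shd_a_list (input : String) :
    input.toList.foldl (fun acc c => if c.isDigit then acc ++ [((c.toNat : Int) - 48)] else acc) [] =
      shdDigits input := by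
  rw [PySem.List.foldl_append_if]
  simp [shdDigits]

theorem shd_b_fold (input : String) (st : Int × Int × Int) :
    input.toList.foldl (fun st c => if c.isDigit then shdStep st ((c.toNat : Int) - 48) else st) st =
      (shdDigits input).foldl shdStep st := by
  rw [show shdDigits input =
      ((input.toList.filter Char.isDigit).map (fun c => ((c.toNat : Int) - 48))) from rfl]
  generalize input.toList = l
  induction l generalizing st with
  | nil => rfl
  | cons c t ih =>
    by_cases h : c.isDigit <;> simp [List.foldl, h, ih]

-- ===== VERDICT (by name: the statement is the Claim_ definition above) =====
theorem secondHighestDigit_spec : Claim_equal_secondHighestDigit := by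
  intro input _
  unfold Spec_secondHighestDigit secondHighestDigit secondHighestDigit_alt
  rw [shd_a_list, shd_b_fold]
  set ds := shdDigits input with hds
  have hcount : ((ds.foldl shdStep (-1, -1, 0)).2.2) = (ds.length : Int) := by
    rw [shd_foldl_count]; simp
  by_cases hlen : 2 ≤ ds.length
  · -- sorted desc list has shape a :: b :: t
    set s := PySem.List.sorted ds (fun x => x) true with hs
    have hperm : s.Perm ds := PySem.List.sorted_perm ds (fun x => x) true
    have hslen : 2 ≤ s.length := by rw [hperm.length_eq]; exact hlen
    obtain ⟨a, b, t, hshape⟩ : ∃ a b t, s = a :: b :: t := by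
      match s, hslen with
      | a :: b :: t, _ => exact ⟨a, b, t, rfl⟩
    have hpw : (a :: b :: t).Pairwise (fun x y => y ≤ x) := by
      have := PySem.List.sorted_pairwise_rev ds (fun x => x)
      rw [← hs, hshape] at this
      exact this
    have hnn : ∀ d ∈ s, 0 ≤ d := fun d hd => shd_digits_nonneg input d (hperm.mem_iff.mp hd)
    have ha : 0 ≤ a := hnn a (by rw [hshape]; simp)
    have hb : 0 ≤ b := hnn b (by rw [hshape]; simp)
    have hfold : ds.foldl shdStep (-1, -1, 0) = (a, b, (2 : Int) + t.length) := by
      rw [← shd_foldl_perm hperm, hshape]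
      exact shd_foldl_sorted a b t hpw ha hb
    have hc2 : ((2:Int) + (t.length : Int)) = (ds.length : Int) := by
      rw [hfold] at hcount; simpa using hcount
    rw [hfold]
    rw [if_pos hlen]
    rw [← hs, hshape]
    rw [if_pos (by simp only []; omega)]
    simp only []
    simp [PySem.List.pyGet?, PySem.List.pyIdx?]
  · rw [if_neg hlen, if_neg (by rw [hcount]; omega)]
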